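-- pv_equiv track=rewrite | github.com/bertnyak/education | lim_max.py | sums_by_quarter
-- ===== SOURCE A (Python) =====
-- def sums_by_quarter(monthly_values):
--     """
--     Calculates sums of values by quarters from a list of monthly values.
--
--     Args:
--         monthly_values: A list of 12 numbers representing monthly values
--
--     Returns:
--         A list of 4 numbers representing quarterly sums
--     """
--     if len(monthly_values) != 12:
--         return []
--
--     quarterly_sums = []
--
--     # Process each quarter (3 months at a time)
--     for i in range(0, 12, 3):
--         quarter_sum = sum(monthly_values[i:i+3])
--         quarterly_sums.append(quarter_sum)
--
--     return quarterly_sums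
-- ===== SOURCE B (Python) =====
-- def sums_by_quarter(monthly_values):
--     if len(monthly_values) != 12:
--         return []
--     quarterly_sums = [0, 0, 0, 0]
--     for i, v in enumerate(monthly_values):
--         quarterly_sums[i // 3] += v
--     return quarterly_sums
-- ===== Notes on version B (the rewrite author's own statement) =====
-- stated objective: alternative
-- what changed: Replaced the quarter-by-quarter loop with slice sums by a single enumerate pass that distributes each monthly value into its quarter bucket via i // 3.
import Mathlib
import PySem

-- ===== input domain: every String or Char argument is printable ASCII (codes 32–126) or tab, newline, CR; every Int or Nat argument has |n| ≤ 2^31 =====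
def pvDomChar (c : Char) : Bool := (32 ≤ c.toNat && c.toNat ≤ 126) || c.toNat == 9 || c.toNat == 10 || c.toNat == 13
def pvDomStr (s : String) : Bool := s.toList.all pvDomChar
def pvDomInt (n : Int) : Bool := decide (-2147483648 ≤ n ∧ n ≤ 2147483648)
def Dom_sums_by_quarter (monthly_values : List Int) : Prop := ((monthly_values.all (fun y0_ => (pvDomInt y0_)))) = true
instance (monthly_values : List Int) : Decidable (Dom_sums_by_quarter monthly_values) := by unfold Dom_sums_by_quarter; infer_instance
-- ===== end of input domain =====

-- B replaces A's per-quarter slice-sum loop with a single enumerate pass distributing each month into its quarter bucket (alternative decomposition, same cost).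


-- ===== PORT A =====
-- Port of A: for i in range(0, 12, 3): append sum(monthly_values[i:i+3])
def sums_by_quarter (monthly_values : List Int) : List Int :=
  if monthly_values.length ≠ 12 then []
  else
    (PySem.List.pyRange 0 12 3).foldl
      (fun quarterly_sums i =>
        quarterly_sums ++ [(PySem.List.slice monthly_values (some i) (some (i + 3))).sum])
      []

-- ===== PORT B =====
-- Port of B: buckets [0,0,0,0]; one enumerate pass adding each value at index i // 3.
-- i ranges over 0..11 so i // 3 is a nonnegative in-range index: .toNat and set/getD are exact here.
def sums_by_quarter_alt (monthly_values : List Int) : List Int :=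
  if monthly_values.length ≠ 12 then []
  else
    (PySem.List.enumerate monthly_values 0).foldl
      (fun quarterly_sums p =>
        let q := (PySem.Int.floordiv p.1 3).toNat
        quarterly_sums.set q (quarterly_sums.getD q 0 + p.2))
      [0, 0, 0, 0]

-- ===== PRECONDITION & SPEC =====
def Spec_sums_by_quarter (monthly_values : List Int) (out : List Int) : Prop := out = sums_by_quarter_alt monthly_values
instance (monthly_values : List Int) (out : List Int) : Decidable (Spec_sums_by_quarter monthly_values out) := by unfold Spec_sums_by_quarter; infer_instance

-- ===== CLAIM (what is proved, stated in full; the proofs are below) =====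
def Claim_equal_sums_by_quarter : Prop := ∀ (monthly_values : List Int), Dom_sums_by_quarter monthly_values → Spec_sums_by_quarter monthly_values (sums_by_quarter monthly_values)

-- ===== LEMMAS AND PROOFS =====
theorem sums_by_quarter_eq (monthly_values : List Int) :
    sums_by_quarter monthly_values = sums_by_quarter_alt monthly_values := by
  by_cases h : monthly_values.length = 12
  · match monthly_values, h with
    | [a0,a1,a2,a3,a4,a5,a6,a7,a8,a9,a10,a11], _ =>
      simp [sums_by_quarter, sums_by_quarter_alt, PySem.List.pyRange, PySem.List.slice, PySem.List.clampIdx, List.range_succ, PySem.List.enumerate,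
        PySem.Int.floordiv, List.foldl, List.set, List.getD]
      norm_num
      all_goals omega
  · simp [sums_by_quarter, sums_by_quarter_alt, h]

-- ===== VERDICT (by name: the statement is the Claim_ definition above) =====
theorem sums_by_quarter_spec : Claim_equal_sums_by_quarter := by
  intro mv _
  unfold Spec_sums_by_quarter
  exact sums_by_quarter_eq mv
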